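-- pv_equiv track=rewrite | github.com/mush60/altera-batch5- | Prabootcamp/CHALLENGE/soal5.py | count_angka
-- ===== SOURCE A (Python) =====
-- def count_angka(angka) :
--   lis = [int(x) for x in str(angka)]
--   result = []
--   dic = {}
--
--   for i in range(10) :
--     dic[i] = lis.count(i)
--
--   for j in range(10) :
--     if(dic[j] == 1) :
--       result.append(j)
--
--   return result
-- ===== SOURCE B (Python) =====
-- def count_angka(angka):
--   lis = sorted(int(x) for x in str(angka))
--   result = []
--   prev = None
--   run = 0
--   for d in lis:
--     if d == prev:
--       run += 1
--     else:
--       if run == 1: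
--         result.append(prev)
--       prev = d
--       run = 1
--   if run == 1:
--     result.append(prev)
--   return result
-- ===== Notes on version B (the rewrite author's own statement) =====
-- stated objective: alternative
-- what changed: B sorts the digit list once and emits digits whose run of equal adjacent values has length 1 in a single scan, instead of A's frequency dict filled by ten lis.count scans over range(10).
import Mathlib
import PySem

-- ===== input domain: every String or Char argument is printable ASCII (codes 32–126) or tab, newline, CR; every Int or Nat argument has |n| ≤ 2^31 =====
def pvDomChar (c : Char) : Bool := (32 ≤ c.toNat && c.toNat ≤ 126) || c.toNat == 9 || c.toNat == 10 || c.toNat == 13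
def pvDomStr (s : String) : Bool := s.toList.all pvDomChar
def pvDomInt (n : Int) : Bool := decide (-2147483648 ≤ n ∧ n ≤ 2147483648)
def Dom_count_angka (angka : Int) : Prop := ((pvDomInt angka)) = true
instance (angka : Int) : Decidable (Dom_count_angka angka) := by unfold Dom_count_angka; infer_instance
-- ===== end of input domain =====

-- B sorts the digit list once and emits digits whose run of equal adjacent values
-- has length 1 in a single scan, instead of A's dict filled by ten lis.count scans.


-- ===== PORT A =====
-- lis = [int(x) for x in str(angka)] : int(x) raises ValueError on a non-digit
-- character (the '-' sign of a negative angka); `none` marks that raise.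
def pvParseDigits : List Char → Option (List Int)
  | [] => some []
  | c :: cs =>
    match PySem.Int.ofStr? (String.ofList [c]) with
    | none => none
    | some v => (pvParseDigits cs).map (v :: ·)

def count_angka (angka : Int) : List Int :=
  match pvParseDigits (PySem.Int.toStr angka).toList with
  | none => []          -- int(x) raised ValueError; excluded by Pre_count_angka
  | some lis =>
    let dic := (PySem.List.pyRange 0 10 1).foldl
      (fun d i => d.insert i ((PySem.List.count lis i : Int))) PySem.Dict.empty
    (PySem.List.pyRange 0 10 1).foldl
      (fun result j => if dic.getD j 0 == 1 then result ++ [j] else result) []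

-- ===== PORT B =====
-- loop body of B's single scan over the sorted digits; state = (result, prev, run).
-- prev is Option Int: Python's prev starts as None and then always holds an int;
-- `d == prev` with prev = None is False, as `some d == none` is.
def pvStep (acc : List Int × Option Int × Int) (d : Int) : List Int × Option Int × Int :=
  if some d == acc.2.1 then (acc.1, acc.2.1, acc.2.2 + 1)
  else ((if acc.2.2 == 1 then acc.1 ++ [acc.2.1.getD 0] else acc.1), some d, 1)

-- trailing `if run == 1: result.append(prev)`; when run == 1, prev is some v,
-- so `.getD 0` only names the int Python's prev holds there.
def pvFinish (st : List Int × Option Int × Int) : List Int :=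
  if st.2.2 == 1 then st.1 ++ [st.2.1.getD 0] else st.1

def count_angka_alt (angka : Int) : List Int :=
  match pvParseDigits (PySem.Int.toStr angka).toList with
  | none => []          -- same comprehension, same ValueError; excluded by Pre_
  | some lis0 =>
    let lis := PySem.List.sorted lis0 (fun x => x) false
    pvFinish (lis.foldl pvStep ([], none, 0))

-- ===== PRECONDITION & SPEC =====
-- Pre_ excludes negative angka, on which str(angka) starts with '-' and
-- int('-') raises ValueError in both A and B.
def Pre_count_angka (angka : Int) : Prop := 0 ≤ angka
instance (angka : Int) : Decidable (Pre_count_angka angka) := by unfold Pre_count_angka; infer_instance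
def pvWitness_count_angka : Int := (120)

def Spec_count_angka (angka : Int) (out : List Int) : Prop := out = count_angka_alt angka
instance (angka : Int) (out : List Int) : Decidable (Spec_count_angka angka out) := by unfold Spec_count_angka; infer_instance

-- ===== CLAIM (what is proved, stated in full; the proofs are below) =====
def Claim_equal_count_angka : Prop := ∀ (angka : Int), Dom_count_angka angka → Pre_count_angka angka → Spec_count_angka angka (count_angka angka)

-- ===== LEMMAS AND PROOFS =====

def pvDigitChars : List Char := ['0','1','2','3','4','5','6','7','8','9']

lemma pv_mem_toDigitsCore (f n : Nat) (l : List Char) (hl : ∀ c ∈ l, c ∈ pvDigitChars) :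
    ∀ c ∈ Nat.toDigitsCore 10 f n l, c ∈ pvDigitChars := by
  induction f generalizing n l with
  | zero => simpa [Nat.toDigitsCore] using hl
  | succ f ih =>
    intro c hc
    have hd : Nat.digitChar (n % 10) ∈ pvDigitChars := by
      have h10 : n % 10 < 10 := Nat.mod_lt _ (by norm_num)
      interval_cases h : n % 10 <;> decide
    simp only [Nat.toDigitsCore] at hc
    rcases Nat.eq_zero_or_pos (n / 10) with h0 | h0
    · rw [h0] at hc; simp at hc
      rcases hc with h | h
      · exact h ▸ hd
      · exact hl _ h
    · rw [if_neg (by omega)] at hc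
      refine ih _ _ ?_ _ hc
      intro x hx
      rcases List.mem_cons.1 hx with h | h
      · exact h ▸ hd
      · exact hl _ h

lemma pv_mem_toChars {n : Int} (hn : 0 ≤ n) :
    ∀ c ∈ PySem.Int.toChars n, c ∈ pvDigitChars := by
  unfold PySem.Int.toChars
  rw [if_neg (by omega)]
  exact pv_mem_toDigitsCore _ _ [] (by simp)

lemma pv_digit_val {c : Char} (hc : c ∈ pvDigitChars) {v : Int}
    (h : PySem.Int.ofStr? (String.ofList [c]) = some v) : 0 ≤ v ∧ v < 10 := by
  rw [PySem.Int.ofStr?_ofList] at h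
  fin_cases hc
  · rw [show PySem.Int.ofChars? ['0'] = some 0 from by decide] at h; cases h; omega
  · rw [show PySem.Int.ofChars? ['1'] = some 1 from by decide] at h; cases h; omega
  · rw [show PySem.Int.ofChars? ['2'] = some 2 from by decide] at h; cases h; omega
  · rw [show PySem.Int.ofChars? ['3'] = some 3 from by decide] at h; cases h; omega
  · rw [show PySem.Int.ofChars? ['4'] = some 4 from by decide] at h; cases h; omega
  · rw [show PySem.Int.ofChars? ['5'] = some 5 from by decide] at h; cases h; omega
  · rw [show PySem.Int.ofChars? ['6'] = some 6 from by decide] at h; cases h; omega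
  · rw [show PySem.Int.ofChars? ['7'] = some 7 from by decide] at h; cases h; omega
  · rw [show PySem.Int.ofChars? ['8'] = some 8 from by decide] at h; cases h; omega
  · rw [show PySem.Int.ofChars? ['9'] = some 9 from by decide] at h; cases h; omega

lemma pv_parse_bounds : ∀ (cs : List Char), (∀ c ∈ cs, c ∈ pvDigitChars) →
    ∀ {lis : List Int}, pvParseDigits cs = some lis → ∀ v ∈ lis, 0 ≤ v ∧ v < 10 := by
  intro cs
  induction cs with
  | nil =>
    intro _ lis h
    simp only [pvParseDigits, Option.some.injEq] at h
    subst h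
    intro v hv
    simp at hv
  | cons c cs ih =>
    intro hall lis h v hv
    simp only [pvParseDigits] at h
    rcases hp : PySem.Int.ofStr? (String.ofList [c]) with _ | w
    · rw [hp] at h; simp at h
    · rw [hp] at h
      rcases ht : pvParseDigits cs with _ | rest
      · rw [ht] at h; simp at h
      · rw [ht] at h
        simp at h
        rw [← h] at hv
        rcases List.mem_cons.1 hv with rfl | hv'
        · exact pv_digit_val (hall c (by simp)) hp
        · exact ih (fun x hx => hall x (by simp [hx])) ht v hv'

-- A's dict dic[i] = lis.count(i) over range(10): a fold over fresh distinct keys.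
lemma pv_dic_getD (lis : List Int) {j : Int} (hj : j ∈ PySem.List.pyRange 0 10 1) :
    ((PySem.List.pyRange 0 10 1).foldl
      (fun d i => d.insert i ((PySem.List.count lis i : Int))) PySem.Dict.empty).getD j 0
      = (lis.count j : Int) := by
  have hitems := PySem.Dict.items_foldl_insert_fresh (PySem.List.pyRange 0 10 1)
      (fun i => i) (fun i => (PySem.List.count lis i : Int)) PySem.Dict.empty
      (by intro a _; simp) (by simpa using PySem.List.nodup_pyRange_one 0 10)
  have hempty : (PySem.Dict.empty : PySem.Dict Int Int).items = [] := rfl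
  apply PySem.Dict.getD_of_mem_items
  · rw [hitems, hempty, List.nil_append, List.mem_map]
    exact ⟨j, hj, by simp [PySem.List.count_eq]⟩
  · unfold PySem.Dict.keys
    rw [hitems, hempty, List.nil_append, List.map_map]
    simpa [Function.comp] using PySem.List.nodup_pyRange_one 0 10

-- A's result is the ascending filter of 0..9 by count == 1
lemma pv_A_filter (lis : List Int) :
    (PySem.List.pyRange 0 10 1).foldl
      (fun result j => if ((PySem.List.pyRange 0 10 1).foldl
          (fun d i => d.insert i ((PySem.List.count lis i : Int))) PySem.Dict.empty).getD j 0 == 1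
        then result ++ [j] else result) []
      = (PySem.List.pyRange 0 10 1).filter (fun j => (lis.count j : Int) == 1) := by
  refine (PySem.List.foldl_congr_mem (PySem.List.pyRange 0 10 1) _
      (fun result j => if ((lis.count j : Int) == 1) = true then result ++ [j] else result) []
      ?_).trans ?_
  · intro acc j hj
    rw [pv_dic_getD lis hj]
  · simpa using PySem.List.foldl_append_if (fun j => (lis.count j : Int) == 1) id
      (PySem.List.pyRange 0 10 1) []

-- structural description of B's scan: one recursion step per run of equal values
def pvGroup : List Int → List Int
  | [] => []
  | x :: xs =>
    if (xs.takeWhile (· == x)).length = 0 then x :: pvGroup (xs.dropWhile (· == x))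
    else pvGroup (xs.dropWhile (· == x))
termination_by l => l.length
decreasing_by
  all_goals simp only [List.length_cons]
  all_goals exact Nat.lt_succ_of_le (List.length_dropWhile_le _ _)

-- mid-run invariant: pending value v, run length k ≥ 1, everything left ≥ v
lemma pv_scan_run : ∀ (s : List Int), List.Pairwise (· ≤ ·) s →
    ∀ (r : List Int) (v k : Int), (∀ y ∈ s, v ≤ y) → 1 ≤ k →
    pvFinish (s.foldl pvStep (r, some v, k)) =
      (if k + ((s.takeWhile (· == v)).length : Int) = 1 then r ++ [v] else r)
        ++ pvGroup (s.dropWhile (· == v)) := by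
  intro s
  induction s with
  | nil =>
    intro _ r v k _ hk
    simp only [List.foldl_nil, List.takeWhile_nil, List.dropWhile_nil, pvGroup,
      pvFinish, List.length_nil]
    split_ifs with h1 h2 h2 <;> simp_all <;> omega
  | cons d t ih =>
    intro hp r v k hge hk
    by_cases hd : (d == v) = true
    · have hdv : d = v := by simpa using hd
      subst hdv
      have hstep : pvStep (r, some d, k) d = (r, some d, k + 1) := by
        simp [pvStep]
      rw [List.foldl_cons, hstep,
        ih hp.of_cons r d (k + 1) (fun y hy => List.rel_of_pairwise_cons hp hy) (by omega)]
      simp only [List.takeWhile_cons, List.dropWhile_cons, hd]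
      simp only [BEq.rfl, if_true, List.length_cons]
      have h1 : ¬ (k + 1 + ((t.takeWhile (· == d)).length : Int) = 1) := by omega
      have h2 : ¬ (k + ((((t.takeWhile (· == d)).length : Nat) + 1 : Nat) : Int) = 1) := by
        push_cast; omega
      rw [if_neg h1, if_neg h2]
    · have hstep : pvStep (r, some v, k) d
          = ((if k == 1 then r ++ [v] else r), some d, 1) := by
        simp [pvStep, hd]
      rw [List.foldl_cons, hstep,
        ih hp.of_cons _ d 1 (fun y hy => List.rel_of_pairwise_cons hp hy) le_rfl]
      simp only [List.takeWhile_cons, List.dropWhile_cons, hd, if_neg, Bool.false_eq_true,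
        not_false_iff, ite_false, List.length_nil]
      rw [pvGroup]
      have hk1 : ((if k == 1 then r ++ [v] else r) : List Int)
          = if k + ((0 : Nat) : Int) = 1 then r ++ [v] else r := by
        split_ifs with h1 h2 h2 <;> simp_all <;> omega
      rw [← hk1]
      split_ifs with h1 h2 h2 <;> simp_all <;> omega

-- B's fold over a sorted list computes pvGroup
lemma pv_scan_eq_group (s : List Int) (hp : List.Pairwise (· ≤ ·) s) :
    pvFinish (s.foldl pvStep ([], none, 0)) = pvGroup s := by
  cases s with
  | nil => simp [pvFinish, pvGroup]
  | cons d t =>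
    have hstep : pvStep ([], none, 0) d = ([], some d, 1) := by simp [pvStep]
    rw [List.foldl_cons, hstep,
      pv_scan_run t hp.of_cons [] d 1 (fun y hy => List.rel_of_pairwise_cons hp hy) le_rfl]
    rw [pvGroup]
    split_ifs with h1 h2 h2 <;> simp_all <;> omega

-- after a run of x in a sorted list, everything remaining is strictly greater
lemma pv_dropWhile_gt : ∀ (xs : List Int), List.Pairwise (· ≤ ·) xs → ∀ (x : Int),
    (∀ y ∈ xs, x ≤ y) → ∀ y ∈ xs.dropWhile (· == x), x < y := by
  intro xs
  induction xs with
  | nil => intro _ x _ y hy; simp at hy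
  | cons a t ih =>
    intro hp x hge y hy
    by_cases ha : (a == x) = true
    · rw [List.dropWhile_cons, if_pos ha] at hy
      exact ih hp.of_cons x (fun z hz => hge z (by simp [hz])) y hy
    · rw [List.dropWhile_cons, if_neg (by simp_all)] at hy
      have hax : a ≠ x := by simpa using ha
      have hxa : x < a := lt_of_le_of_ne (hge a (by simp)) (Ne.symm hax)
      rcases List.mem_cons.1 hy with rfl | hy'
      · exact hxa
      · exact lt_of_lt_of_le hxa (List.rel_of_pairwise_cons hp hy')

lemma pv_takeWhile_all : ∀ (xs : List Int) (x : Int) (y : Int),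
    y ∈ xs.takeWhile (· == x) → y = x := by
  intro xs x y hy
  have := List.mem_takeWhile_imp hy
  simpa using this

-- membership in pvGroup of a sorted list = appearing exactly once
lemma pv_group_mem_aux : ∀ (n : Nat) (s : List Int), s.length ≤ n →
    List.Pairwise (· ≤ ·) s → ∀ a, a ∈ pvGroup s ↔ s.count a = 1 := by
  intro n
  induction n with
  | zero =>
    intro s hs _ a
    rw [List.length_eq_zero_iff.1 (Nat.le_zero.1 hs)]
    simp [pvGroup]
  | succ n ih =>
    intro s hs hp a
    cases s with
    | nil => simp [pvGroup]
    | cons x xs =>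
      have hsplit := List.takeWhile_append_dropWhile (p := (· == x)) (l := xs)
      have hdw : List.Pairwise (· ≤ ·) (xs.dropWhile (· == x)) :=
        hp.of_cons.sublist (List.dropWhile_sublist _)
      have hlen : (xs.dropWhile (· == x)).length ≤ n := by
        have h1 := List.length_dropWhile_le (p := (· == x)) (l := xs)
        simp only [List.length_cons] at hs
        omega
      have hih := ih (xs.dropWhile (· == x)) hlen hdw
      have hgt : ∀ y ∈ xs.dropWhile (· == x), x < y :=
        pv_dropWhile_gt xs hp.of_cons x (fun y hy => List.rel_of_pairwise_cons hp hy)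
      have hxs : (xs.takeWhile (· == x)).count a + (xs.dropWhile (· == x)).count a
          = xs.count a := by
        rw [← List.count_append, hsplit]
      by_cases hax : a = x
      · subst hax
        have hdw0 : (xs.dropWhile (· == a)).count a = 0 := by
          rw [List.count_eq_zero]
          intro hmem
          exact lt_irrefl a (hgt a hmem)
        have htwc : (xs.takeWhile (· == a)).count a = (xs.takeWhile (· == a)).length := by
          rw [List.count_eq_length]
          intro y hy
          have := pv_takeWhile_all xs a y hy
          simp [this]
        have hcount : (a :: xs).count a = 1 + (xs.takeWhile (· == a)).length := by
          rw [List.count_cons, ← hxs, hdw0, htwc]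
          simp
          omega
        have hnot : a ∉ pvGroup (xs.dropWhile (· == a)) := by
          intro hmem
          have := (hih a).1 hmem
          omega
        rw [pvGroup]
        split_ifs with h0
        · simp [hcount, h0]
        · constructor
          · intro hmem; exact absurd hmem hnot
          · intro hc; exfalso; rw [hcount] at hc; omega
      · have htw0 : (xs.takeWhile (· == x)).count a = 0 := by
          rw [List.count_eq_zero]
          intro hmem
          exact hax (pv_takeWhile_all xs x a hmem)
        have hcount : (x :: xs).count a = (xs.dropWhile (· == x)).count a := by
          rw [List.count_cons, ← hxs, htw0]
          simp [hax]
          omega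
        rw [pvGroup, hcount]
        split_ifs with h0
        · rw [List.mem_cons]
          constructor
          · rintro (rfl | h)
            · exact absurd rfl hax
            · exact (hih a).1 h
          · intro h; exact Or.inr ((hih a).2 h)
        · exact hih a

lemma pv_group_mem (s : List Int) (hp : List.Pairwise (· ≤ ·) s) (a : Int) :
    a ∈ pvGroup s ↔ s.count a = 1 :=
  pv_group_mem_aux s.length s le_rfl hp a

-- pvGroup of a sorted list is strictly increasing
lemma pv_group_lt_aux : ∀ (n : Nat) (s : List Int), s.length ≤ n →
    List.Pairwise (· ≤ ·) s → List.Pairwise (· < ·) (pvGroup s) := by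
  intro n
  induction n with
  | zero =>
    intro s hs _
    rw [List.length_eq_zero_iff.1 (Nat.le_zero.1 hs)]
    simp [pvGroup]
  | succ n ih =>
    intro s hs hp
    cases s with
    | nil => simp [pvGroup]
    | cons x xs =>
      have hdw : List.Pairwise (· ≤ ·) (xs.dropWhile (· == x)) :=
        hp.of_cons.sublist (List.dropWhile_sublist _)
      have hlen : (xs.dropWhile (· == x)).length ≤ n := by
        have h1 := List.length_dropWhile_le (p := (· == x)) (l := xs)
        simp only [List.length_cons] at hs
        omega
      have hgt : ∀ y ∈ xs.dropWhile (· == x), x < y :=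
        pv_dropWhile_gt xs hp.of_cons x (fun y hy => List.rel_of_pairwise_cons hp hy)
      rw [pvGroup]
      split_ifs with h0
      · refine List.Pairwise.cons ?_ (ih _ hlen hdw)
        intro y hy
        have hc := (pv_group_mem _ hdw y).1 hy
        have : y ∈ xs.dropWhile (· == x) := List.count_pos_iff.1 (by omega)
        exact hgt y this
      · exact ih _ hlen hdw

lemma pv_group_lt (s : List Int) (hp : List.Pairwise (· ≤ ·) s) :
    List.Pairwise (· < ·) (pvGroup s) :=
  pv_group_lt_aux s.length s le_rfl hp

-- the core: on a digit list with values in 0..9 the two bodies agree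
lemma pv_core (lis : List Int) (hb : ∀ v ∈ lis, 0 ≤ v ∧ v < 10) :
    (PySem.List.pyRange 0 10 1).foldl
      (fun result j => if ((PySem.List.pyRange 0 10 1).foldl
          (fun d i => d.insert i ((PySem.List.count lis i : Int))) PySem.Dict.empty).getD j 0 == 1
        then result ++ [j] else result) []
    = pvFinish ((PySem.List.sorted lis (fun x => x) false).foldl pvStep ([], none, 0)) := by
  have hps : List.Pairwise (· ≤ ·) (PySem.List.sorted lis (fun x => x) false) := by
    simpa using PySem.List.sorted_pairwise lis (fun x => x)
  rw [pv_A_filter, pv_scan_eq_group _ hps]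
  have hcnt : ∀ a, (PySem.List.sorted lis (fun x => x) false).count a = lis.count a :=
    fun a => (PySem.List.sorted_perm lis (fun x => x) false).count_eq a
  -- both sides are strictly increasing lists with the same membership
  have hlt1 : List.Pairwise (· < ·)
      ((PySem.List.pyRange 0 10 1).filter (fun j => (lis.count j : Int) == 1)) :=
    (PySem.List.pairwise_lt_pyRange_one 0 10).filter _
  have hlt2 : List.Pairwise (· < ·) (pvGroup (PySem.List.sorted lis (fun x => x) false)) :=
    pv_group_lt _ hps
  have hmemiff : ∀ a,
      a ∈ (PySem.List.pyRange 0 10 1).filter (fun j => (lis.count j : Int) == 1) ↔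
      a ∈ pvGroup (PySem.List.sorted lis (fun x => x) false) := by
    intro a
    rw [pv_group_mem _ hps a, hcnt a, List.mem_filter, PySem.List.mem_pyRange_one]
    constructor
    · rintro ⟨-, hc⟩
      have : (lis.count a : Int) = 1 := by simpa using hc
      omega
    · intro hc
      have hm : a ∈ lis := List.count_pos_iff.1 (by omega)
      exact ⟨by have := hb a hm; omega, by simp [hc]⟩
  have hperm : (pvGroup (PySem.List.sorted lis (fun x => x) false)).Perm
      ((PySem.List.pyRange 0 10 1).filter (fun j => (lis.count j : Int) == 1)) := by
    rw [List.perm_ext_iff_of_nodup (hlt2.imp ne_of_lt) (hlt1.imp ne_of_lt)]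
    intro a
    exact (hmemiff a).symm
  have h1 : PySem.List.sorted (pvGroup (PySem.List.sorted lis (fun x => x) false))
      (fun x => x) false
      = (PySem.List.pyRange 0 10 1).filter (fun j => (lis.count j : Int) == 1) :=
    PySem.List.sorted_eq_of_perm_of_pairwise_lt _ _ _ hperm.symm (by simpa using hlt1)
  have h2 : PySem.List.sorted (pvGroup (PySem.List.sorted lis (fun x => x) false))
      (fun x => x) false
      = pvGroup (PySem.List.sorted lis (fun x => x) false) :=
    PySem.List.sorted_eq_self_of_pairwise _ _ (by simpa using hlt2.imp le_of_lt)
  rw [← h1, h2]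

-- ===== VERDICT (by name: the statement is the Claim_ definition above) =====
theorem count_angka_spec : Claim_equal_count_angka := by
  intro angka _ hpre
  unfold Spec_count_angka count_angka count_angka_alt
  rcases h : pvParseDigits (PySem.Int.toStr angka).toList with _ | lis
  · rfl
  · have hdig : ∀ c ∈ (PySem.Int.toStr angka).toList, c ∈ pvDigitChars := by
      rw [PySem.Int.toList_toStr]; exact pv_mem_toChars hpre
    exact pv_core lis (pv_parse_bounds _ hdig h)
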